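-- pv_equiv track=rewrite | github.com/bestswlkh0310/algorithm | bj1802.py | check
-- ===== SOURCE A (Python) =====
-- def check(lst):
--     l = len(lst)
--     mid = l // 2
--     if l == 1:
--         return True
--     t = False
--     for i in range(mid):
--         if lst[i] == lst[l - i - 1]:
--             t = True
--     if t:
--         return False
--     if lst[mid - 1] == lst[mid]:
--         return check(lst[:mid])
--     else:
--         return check(lst[mid + 1:])
-- ===== SOURCE B (Python) =====
-- def check(lst):
--     lo, hi = 0, len(lst)
--     while hi - lo > 1:
--         mid = (hi - lo) // 2
--         if any(lst[lo + i] == lst[hi - 1 - i] for i in range(mid)):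
--             return False
--         if lst[lo + mid - 1] == lst[lo + mid]:
--             hi = lo + mid
--         else:
--             lo = lo + mid + 1
--     return True
-- ===== Notes on version B (the rewrite author's own statement) =====
-- stated objective: alternative
-- what changed: A's tail recursion over freshly sliced half-lists is replaced by an iterative two-index window (lo, hi) while-loop over the original list, and A's full-pass boolean-flag scan by an early-exiting any(); no lists are ever copied.
import Mathlib
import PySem

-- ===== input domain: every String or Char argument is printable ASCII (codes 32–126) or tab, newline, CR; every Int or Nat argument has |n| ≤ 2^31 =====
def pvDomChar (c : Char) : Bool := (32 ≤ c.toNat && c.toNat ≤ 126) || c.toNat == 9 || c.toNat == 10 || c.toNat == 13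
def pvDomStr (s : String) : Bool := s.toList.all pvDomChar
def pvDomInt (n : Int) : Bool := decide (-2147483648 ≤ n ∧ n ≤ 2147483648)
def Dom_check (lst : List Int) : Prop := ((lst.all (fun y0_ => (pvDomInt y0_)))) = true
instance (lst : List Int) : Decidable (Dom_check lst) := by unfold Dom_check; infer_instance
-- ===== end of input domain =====

-- B replaces A's slicing recursion by an iterative two-index window loop (no list is ever copied,
-- the scan exits early); equality of the return values is proved on Pre_check, i.e. wherever
-- Python A returns at all (everywhere else A raises IndexError, and B returns True there).

-- ===== PORT A =====
-- literal port of A; the extra Nat argument only makes the recursion total (ample: each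
-- recursive call is on a strictly shorter list); pyGetD's default 0 is only reached where
-- Python raises IndexError (outside Pre_check).
def checkGo : Nat → List Int → Bool
  | 0, _ => false
  | Nat.succ n, lst =>
    let l : Int := lst.length
    let mid : Int := PySem.Int.floordiv l 2
    if l = 1 then true
    else
      let t : Bool := (PySem.List.pyRange 0 mid 1).foldl
        (fun t i => if PySem.List.pyGetD lst i 0 = PySem.List.pyGetD lst (l - i - 1) 0 then true else t) false
      if t then false
      else if PySem.List.pyGetD lst (mid - 1) 0 = PySem.List.pyGetD lst mid 0 then
        checkGo n (PySem.List.slice lst none (some mid))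
      else
        checkGo n (PySem.List.slice lst (some (mid + 1)) none)

def check (lst : List Int) : Bool := checkGo (lst.length + 1) lst

-- ===== PORT B =====
-- literal port of Source B (the while-loop as a tail recursion; the extra Nat argument only
-- makes it total — ample, since the window hi - lo strictly shrinks every iteration)
def altGo : Nat → List Int → Int → Int → Bool
  | 0, _, _, _ => false
  | Nat.succ n, lst, lo, hi =>
    if 1 < hi - lo then
      let mid : Int := PySem.Int.floordiv (hi - lo) 2
      if (PySem.List.pyRange 0 mid 1).any
          (fun i => PySem.List.pyGetD lst (lo + i) 0 = PySem.List.pyGetD lst (hi - 1 - i) 0) then false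
      else if PySem.List.pyGetD lst (lo + mid - 1) 0 = PySem.List.pyGetD lst (lo + mid) 0 then
        altGo n lst lo (lo + mid)
      else
        altGo n lst (lo + mid + 1) hi
    else true

def check_alt (lst : List Int) : Bool := altGo (lst.length + 1) lst 0 (lst.length : Int)

-- ===== PRECONDITION & SPEC =====
-- pvSafeK lst k lo hi decides whether A, started on the window [lo, hi) of lst, returns a value:
-- it returns false exactly where A's descent reaches an empty sublist and raises IndexError.
-- The Nat argument k only bounds the descent (any k ≥ hi - lo gives the same answer).
def pvSafeK : Nat → List Int → Nat → Nat → Bool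
  | 0, _, _, _ => false
  | Nat.succ k, lst, lo, hi =>
    if hi ≤ lo + 1 then decide (lo < hi)
    else if (List.range ((hi - lo) / 2)).any
        (fun i => lst.getD (lo + i) 0 == lst.getD (hi - 1 - i) 0) then true
    else if hi = lo + 2 then false
    else if lst.getD (lo + (hi - lo) / 2 - 1) 0 == lst.getD (lo + (hi - lo) / 2) 0 then
      pvSafeK k lst lo (lo + (hi - lo) / 2)
    else
      pvSafeK k lst (lo + (hi - lo) / 2 + 1) hi

-- Pre_check holds exactly on the inputs where Python A returns (it excludes nothing A returns on):
-- A raises IndexError precisely when its value-directed descent lands on an empty sublist, a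
-- path condition on the input's elements with no shorter closed form.
def Pre_check (lst : List Int) : Prop := pvSafeK lst.length lst 0 lst.length = true
instance (lst : List Int) : Decidable (Pre_check lst) := by unfold Pre_check; infer_instance
def pvWitness_check : List Int := ([1, 2, 1] : List Int)

def Spec_check (lst : List Int) (out : Bool) : Prop := out = check_alt lst
instance (lst : List Int) (out : Bool) : Decidable (Spec_check lst out) := by unfold Spec_check; infer_instance

-- ===== CLAIM (what is proved, stated in full; the proofs are below) =====
def Claim_equal_check : Prop := ∀ (lst : List Int), Dom_check lst → Pre_check lst → Spec_check lst (check lst)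

-- ===== LEMMAS AND PROOFS =====
lemma foldl_flag (r : List Int) (p : Int → Prop) [DecidablePred p] (b : Bool) :
    r.foldl (fun t i => if p i then true else t) b = (b || r.any (fun i => decide (p i))) := by
  induction r generalizing b with
  | nil => simp
  | cons x xs ih =>
    rw [List.foldl_cons, List.any_cons, ih]
    by_cases h : p x <;> simp [h]

lemma go_eq (lst : List Int) : ∀ fuelN (k lo hi : Nat), lo ≤ hi → hi ≤ lst.length →
    hi - lo ≤ k → pvSafeK k lst lo hi = true →
    checkGo fuelN ((lst.drop lo).take (hi - lo)) = altGo fuelN lst (lo : Int) (hi : Int) := by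
  intro fuelN
  induction fuelN with
  | zero => intro _ _ _ _ _ _ _; rfl
  | succ n ih =>
    intro k lo hi hlh hhl hwk hsafe
    cases k with
    | zero => simp [pvSafeK] at hsafe
    | succ k' =>
    rw [pvSafeK] at hsafe
    set w := (lst.drop lo).take (hi - lo) with hw
    have hwlen : w.length = hi - lo := by simp [hw]; omega
    by_cases hsmall : hi ≤ lo + 1
    · rw [if_pos hsmall] at hsafe
      have hlt : lo < hi := by simpa using hsafe
      have h1 : hi = lo + 1 := by omega
      have hw1 : w.length = 1 := by omega
      simp only [checkGo, altGo, hw1]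
      norm_num
      omega
    rw [if_neg hsmall] at hsafe
    have hge2 : lo + 2 ≤ hi := by omega
    -- index transfer: window index ↔ list index
    have hIdx : ∀ i : Int, 0 ≤ i → i < ((hi : Int) - lo) →
        PySem.List.pyGetD w i 0 = PySem.List.pyGetD lst ((lo : Int) + i) 0 := by
      intro i h0i hilt
      rw [PySem.List.pyGetD_eq_getElem w 0 h0i (by rw [hwlen]; omega),
          PySem.List.pyGetD_eq_getElem lst 0 (by omega) (by omega)]
      have h2 : ((lo : Int) + i).toNat = lo + i.toNat := by omega
      simp only [hw, List.getElem_take, List.getElem_drop, h2]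
    have hl : ((w.length : Nat) : Int) = (hi : Int) - lo := by rw [hwlen]; omega
    have hfd : PySem.Int.floordiv ((hi : Int) - lo) 2 = ((hi : Int) - lo) / 2 :=
      PySem.Int.floordiv_eq_ediv_of_pos (by norm_num)
    simp only [checkGo, altGo, hl, hfd]
    rw [if_neg (by omega : ¬ ((hi : Int) - lo = 1)), if_pos (by omega : (1 : Int) < (hi : Int) - lo)]
    set mN : Nat := (hi - lo) / 2 with hmN
    have hmid : ((hi : Int) - lo) / 2 = (mN : Int) := by omega
    have hm1 : 1 ≤ mN := by omega
    have hmlt : mN < hi - lo := by omega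
    -- A's flag loop equals B's any()
    have hloop : ((PySem.List.pyRange 0 (((hi : Int) - lo) / 2) 1).foldl
        (fun t i => if PySem.List.pyGetD w i 0 = PySem.List.pyGetD w ((hi : Int) - (lo : Int) - i - 1) 0 then true else t) false)
        = ((PySem.List.pyRange 0 (((hi : Int) - lo) / 2) 1).any
        (fun i => decide (PySem.List.pyGetD lst ((lo : Int) + i) 0 = PySem.List.pyGetD lst ((hi : Int) - 1 - i) 0))) := by
      rw [foldl_flag, Bool.false_or]
      apply PySem.List.any_congr_mem
      intro i hmem
      rw [PySem.List.mem_pyRange_one] at hmem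
      obtain ⟨h0i, him⟩ := hmem
      have e1 := hIdx i h0i (by omega)
      have e2 := hIdx ((hi : Int) - (lo : Int) - i - 1) (by omega) (by omega)
      have e3 : (lo : Int) + ((hi : Int) - (lo : Int) - i - 1) = (hi : Int) - 1 - i := by ring
      rw [decide_eq_decide, e1, e2, e3]
    -- B's any() equals the Nat-indexed scan of pvSafeK
    have hscan : ((PySem.List.pyRange 0 (((hi : Int) - lo) / 2) 1).any
        (fun i => decide (PySem.List.pyGetD lst ((lo : Int) + i) 0 = PySem.List.pyGetD lst ((hi : Int) - 1 - i) 0)))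
        = ((List.range mN).any (fun i => lst.getD (lo + i) 0 == lst.getD (hi - 1 - i) 0)) := by
      rw [hmid, PySem.List.pyRange_one]
      have hcnt : (((mN : Int) - 0)).toNat = mN := by omega
      rw [hcnt, List.any_map]
      apply PySem.List.any_congr_mem
      intro i hmem
      rw [List.mem_range] at hmem
      have c1 : (0 : Int) + (i : Int) = ((i : Nat) : Int) := by omega
      have c2 : (lo : Int) + ((i : Nat) : Int) = ((lo + i : Nat) : Int) := by omega
      have c3 : (hi : Int) - 1 - ((i : Nat) : Int) = ((hi - 1 - i : Nat) : Int) := by omega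
      simp only [Function.comp, c1, c2, c3, PySem.List.pyGetD_natCast]
      rw [Bool.eq_iff_iff]
      simp [beq_iff_eq]
    rw [hloop, hscan]
    by_cases hany : ((List.range mN).any (fun i => lst.getD (lo + i) 0 == lst.getD (hi - 1 - i) 0)) = true
    · rw [if_pos hany, if_pos hany]
    rw [if_neg hany, if_neg hany]
    rw [if_neg hany] at hsafe
    by_cases h2 : hi = lo + 2
    · rw [if_pos h2] at hsafe
      exact absurd hsafe (by simp)
    rw [if_neg h2] at hsafe
    have hge3 : lo + 3 ≤ hi := by omega
    -- the middle comparison, in all three formulations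
    have hmidconv : ∀ (a : Nat), a < hi → PySem.List.pyGetD lst ((a : Nat) : Int) 0 = lst.getD a 0 := by
      intro a _; exact PySem.List.pyGetD_natCast lst a 0
    have cA : (lo : Int) + (((hi : Int) - lo) / 2) - 1 = ((lo + mN - 1 : Nat) : Int) := by omega
    have cB : (lo : Int) + (((hi : Int) - lo) / 2) = ((lo + mN : Nat) : Int) := by omega
    have hmidA : PySem.List.pyGetD w ((((hi:Int) - lo) / 2) - 1) 0 = lst.getD (lo + mN - 1) 0 := by
      have e := hIdx ((((hi:Int) - lo) / 2) - 1) (by omega) (by omega)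
      rw [e, (by omega : (lo : Int) + ((((hi:Int) - lo) / 2) - 1) = ((lo + mN - 1 : Nat) : Int))]
      exact hmidconv _ (by omega)
    have hmidB : PySem.List.pyGetD w (((hi:Int) - lo) / 2) 0 = lst.getD (lo + mN) 0 := by
      have e := hIdx (((hi:Int) - lo) / 2) (by omega) (by omega)
      rw [e, cB]
      exact hmidconv _ (by omega)
    have hmidA' : PySem.List.pyGetD lst ((lo : Int) + (((hi:Int) - lo) / 2) - 1) 0 = lst.getD (lo + mN - 1) 0 := by
      rw [cA]; exact hmidconv _ (by omega)
    have hmidB' : PySem.List.pyGetD lst ((lo : Int) + (((hi:Int) - lo) / 2)) 0 = lst.getD (lo + mN) 0 := by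
      rw [cB]; exact hmidconv _ (by omega)
    rw [hmidA, hmidB, hmidA', hmidB']
    -- slices are sub-windows
    have hsliceL : PySem.List.slice w none (some (((hi:Int) - lo) / 2)) = (lst.drop lo).take ((lo + mN) - lo) := by
      rw [PySem.List.slice_to w (by omega)]
      simp only [hw, List.take_take]
      congr 1
      omega
    have hsliceR : PySem.List.slice w (some ((((hi:Int) - lo) / 2) + 1)) none = (lst.drop (lo + mN + 1)).take (hi - (lo + mN + 1)) := by
      rw [PySem.List.slice_from w (by omega)]
      simp only [hw, List.drop_take, List.drop_drop]
      have e1 : ((((hi:Int) - lo) / 2) + 1).toNat = mN + 1 := by omega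
      rw [e1]
      have e2 : lo + (mN + 1) = lo + mN + 1 := by omega
      rw [e2]
      congr 1
      omega
    by_cases hc : lst.getD (lo + mN - 1) 0 = lst.getD (lo + mN) 0
    · rw [if_pos hc, if_pos hc]
      rw [if_pos (by simpa [beq_iff_eq] using hc)] at hsafe
      rw [hsliceL]
      have := ih k' lo (lo + mN) (by omega) (by omega) (by omega) hsafe
      rw [this]
      congr 1
      push_cast
      omega
    · rw [if_neg hc, if_neg hc]
      rw [if_neg (by simpa [beq_iff_eq] using hc)] at hsafe
      rw [hsliceR]
      have := ih k' (lo + mN + 1) hi (by omega) hhl (by omega) hsafe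
      rw [this]
      congr 1
      push_cast
      omega

-- ===== VERDICT (by name: the statements are the Claim_ definitions above) =====
theorem check_spec : Claim_equal_check := by
  intro lst _ hpre
  unfold Spec_check check check_alt
  have h := go_eq lst (lst.length + 1) lst.length 0 lst.length (Nat.zero_le _) (le_refl _)
    (by omega) hpre
  simpa using h
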